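-- pv_equiv track=rewrite | github.com/emarro/czi-minimal | callbacks/visualizer.py | decode_utf8_bytes
-- ===== SOURCE A (Python) =====
-- def decode_utf8_bytes(byte_list):
--     """
--     Given a set of bytes, decode them to utf8 chars
--     """
--     decoded_chars = []
--     ch_idx = 0
--     byte_idx = 0
--     n = len(byte_list)
--     stop_decoding = False
--     while byte_idx < n:
--         b = byte_list[byte_idx]
--         if b == 254:
--             ch, num_bytes = "<BOS>", 1
--         elif b == 255:
--             ch, num_bytes = "<EOS>", 1
--         else:
--             for num_bytes in range(1, 5):  # utf8 chars can be between 1 and 8 bytes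
--                 if byte_idx + num_bytes > n:  # out of range
--                     stop_decoding = True
--                     break
--                 chunk = bytearray(byte_list[byte_idx : byte_idx + num_bytes])
--                 try:  # see if this chunk is valid
--                     ch = chunk.decode("utf-8")
--                     stop_decoding = False
--                     break
--                 except UnicodeDecodeError:  # chunk is invalid, try another chunk size or error out if out of range
--                     stop_decoding = True
--             else:
--                 # Invalid UTF-8
--                 stop_decoding = True
--
--         if stop_decoding:
--             break
--
--         decoded_chars.append(
--             (ch_idx, ch, num_bytes)
--         )  # break up the bytes into (index in origina byte string, decoded char, num bytes in the decoded char)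
--         byte_idx += (
--             num_bytes  # move forward in byte stre depending on bytes in decoded char
--         )
--         ch_idx += 1
--
--     return decoded_chars
-- ===== SOURCE B (Python) =====
-- def decode_utf8_bytes(byte_list):
--     """
--     Given a set of bytes, decode them to utf8 chars
--     """
--     decoded_chars = []
--     ch_idx = 0
--     i = 0
--     n = len(byte_list)
--     while i < n:
--         b = byte_list[i]
--         if b == 254:
--             decoded_chars.append((ch_idx, "<BOS>", 1))
--             i += 1
--             ch_idx += 1
--             continue
--         if b == 255:
--             decoded_chars.append((ch_idx, "<EOS>", 1))
--             i += 1
--             ch_idx += 1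
--             continue
--         # sequence length from the lead byte's high bits
--         if b < 0x80:
--             k = 1
--         elif 0xC0 <= b <= 0xDF:
--             k = 2
--         elif 0xE0 <= b <= 0xEF:
--             k = 3
--         elif 0xF0 <= b <= 0xF7:
--             k = 4
--         else:
--             break  # invalid lead byte
--         if i + k > n:
--             break  # truncated sequence
--         try:
--             ch = bytes(byte_list[i : i + k]).decode("utf-8")
--         except UnicodeDecodeError:
--             break  # malformed sequence (bad continuation, overlong, surrogate, ...)
--         decoded_chars.append((ch_idx, ch, k))
--         i += k
--         ch_idx += 1
--     return decoded_chars
-- ===== Notes on version B (the rewrite author's own statement) =====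
-- stated objective: idiomatic
-- what changed: B computes the UTF-8 sequence length directly from the lead byte's range (ASCII 1, 0xC0-0xDF 2, 0xE0-0xEF 3, 0xF0-0xF7 4, else stop) and decodes that one slice, instead of A's inner trial loop that attempts chunk sizes 1..4 and accepts the first that decodes.
-- outside the precondition, e.g. on decode_utf8_bytes([128, 65, 65, 65, 300]): A returns [], B returns []
import Mathlib
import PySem

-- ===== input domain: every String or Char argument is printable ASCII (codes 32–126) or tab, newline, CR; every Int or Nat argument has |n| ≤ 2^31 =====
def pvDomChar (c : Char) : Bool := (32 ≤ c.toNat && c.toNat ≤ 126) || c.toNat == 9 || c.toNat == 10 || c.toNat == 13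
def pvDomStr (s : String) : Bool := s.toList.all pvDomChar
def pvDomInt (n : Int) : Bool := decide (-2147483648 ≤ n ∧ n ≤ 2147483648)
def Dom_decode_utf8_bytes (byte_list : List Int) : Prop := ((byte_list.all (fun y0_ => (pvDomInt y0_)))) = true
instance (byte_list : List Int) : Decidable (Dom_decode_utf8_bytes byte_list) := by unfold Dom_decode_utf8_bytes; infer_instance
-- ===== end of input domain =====

-- B computes the UTF-8 sequence length from the lead byte instead of A's trial loop over
-- chunk sizes 1..4; one decode attempt per position instead of up to four (idiomatic, same cost class).

-- ===== shared helper: Python's strict bytes.decode("utf-8"), exact for byte lists =====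
-- (both Pythons call .decode("utf-8"); `none` = UnicodeDecodeError)
def pvIsCont (b : Int) : Bool := decide (128 ≤ b) && decide (b ≤ 191)

def pvCont3 (b0 b1 : Int) : Bool :=
  if b0 = 224 then decide (160 ≤ b1) && decide (b1 ≤ 191)
  else if b0 = 237 then decide (128 ≤ b1) && decide (b1 ≤ 159)
  else pvIsCont b1

def pvCont4 (b0 b1 : Int) : Bool :=
  if b0 = 240 then decide (144 ≤ b1) && decide (b1 ≤ 191)
  else if b0 = 244 then decide (128 ≤ b1) && decide (b1 ≤ 143)
  else pvIsCont b1

def pvDec : List Int → Option (List Char)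
  | [] => some []
  | b :: r =>
    if 0 ≤ b ∧ b < 128 then
      (pvDec r).map (fun cs => Char.ofNat b.toNat :: cs)
    else if 194 ≤ b ∧ b ≤ 223 then
      match r with
      | b1 :: r2 =>
        if pvIsCont b1 then
          (pvDec r2).map (fun cs => Char.ofNat ((b - 192) * 64 + (b1 - 128)).toNat :: cs)
        else none
      | [] => none
    else if 224 ≤ b ∧ b ≤ 239 then
      match r with
      | b1 :: b2 :: r3 =>
        if pvCont3 b b1 && pvIsCont b2 then
          (pvDec r3).map (fun cs =>
            Char.ofNat ((b - 224) * 4096 + (b1 - 128) * 64 + (b2 - 128)).toNat :: cs)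
        else none
      | _ => none
    else if 240 ≤ b ∧ b ≤ 244 then
      match r with
      | b1 :: b2 :: b3 :: r4 =>
        if pvCont4 b b1 && pvIsCont b2 && pvIsCont b3 then
          (pvDec r4).map (fun cs =>
            Char.ofNat ((b - 240) * 262144 + (b1 - 128) * 4096 + (b2 - 128) * 64 + (b3 - 128)).toNat :: cs)
        else none
      | _ => none
    else none

def pvDecode? (l : List Int) : Option String := (pvDec l).map String.mk

-- ===== PORT A =====
-- A's inner `for num_bytes in range(1, 5)` trying chunk sizes; none = stop_decoding
def pvTryA (l : List Int) : List Nat → Option (String × Nat)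
  | [] => none
  | k :: rest =>
    if l.length < k then none          -- byte_idx + num_bytes > n : out of range, stop
    else
      match pvDecode? (l.take k) with  -- byte_list[byte_idx : byte_idx + num_bytes].decode
      | some ch => some (ch, k)
      | none => pvTryA l rest

-- needed by pvLoopA's termination argument
theorem pvTryA_mem : ∀ (sizes : List Nat) (l : List Int) (ch : String) (k : Nat),
    pvTryA l sizes = some (ch, k) → k ∈ sizes := by
  intro sizes
  induction sizes with
  | nil => intro l ch k h; simp [pvTryA] at h
  | cons s rest ih =>
    intro l ch k h
    simp only [pvTryA] at h
    split at h
    · exact absurd h (by simp)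
    · split at h
      · simp_all
      · exact List.mem_cons_of_mem _ (ih l ch k h)

-- A's while loop; byte_idx is represented by the remaining suffix of byte_list
def pvLoopA (ch_idx : Int) : List Int → List (Int × String × Int)
  | [] => []
  | b :: t =>
    match hr : (if b = 254 then some ("<BOS>", 1)
                else if b = 255 then some ("<EOS>", 1)
                else pvTryA (b :: t) [1, 2, 3, 4]) with
    | none => []                                 -- stop_decoding: break
    | some (ch, nb) =>
      (ch_idx, ch, (nb : Int)) :: pvLoopA (ch_idx + 1) ((b :: t).drop nb)
  termination_by l => l.length
  decreasing_by
    simp only [List.length_drop]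
    have hk : 1 ≤ nb := by
      split_ifs at hr with h1 h2
      · simp_all
      · simp_all
      · have := pvTryA_mem _ _ _ _ hr; simp at this; omega
    simp; omega

def decode_utf8_bytes (byte_list : List Int) : List (Int × String × Int) :=
  pvLoopA 0 byte_list

-- ===== PORT B =====
-- sequence length from the lead byte's range; none = invalid lead, stop
def pvLeadLen (b : Int) : Option Nat :=
  if b < 128 then some 1
  else if 192 ≤ b ∧ b ≤ 223 then some 2
  else if 224 ≤ b ∧ b ≤ 239 then some 3
  else if 240 ≤ b ∧ b ≤ 247 then some 4
  else none

-- needed by pvLoopB's termination argument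
theorem pvLeadLen_pos (b : Int) (k : Nat) (h : pvLeadLen b = some k) : 1 ≤ k := by
  simp only [pvLeadLen] at h; split_ifs at h <;> simp at h <;> omega

-- B's while loop; i is represented by the remaining suffix of byte_list
def pvLoopB (ch_idx : Int) : List Int → List (Int × String × Int)
  | [] => []
  | b :: t =>
    if b = 254 then (ch_idx, "<BOS>", 1) :: pvLoopB (ch_idx + 1) t
    else if b = 255 then (ch_idx, "<EOS>", 1) :: pvLoopB (ch_idx + 1) t
    else
      match hk : pvLeadLen b with
      | none => []                               -- invalid lead byte: break
      | some k =>
        if (b :: t).length < k then []           -- i + k > n : break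
        else
          match pvDecode? ((b :: t).take k) with
          | none => []                           -- UnicodeDecodeError: break
          | some ch => (ch_idx, ch, (k : Int)) :: pvLoopB (ch_idx + 1) ((b :: t).drop k)
  termination_by l => l.length
  decreasing_by
    · simp
    · simp
    · have := pvLeadLen_pos b k hk; simp; omega

def decode_utf8_bytes_alt (byte_list : List Int) : List (Int × String × Int) :=
  pvLoopB 0 byte_list

-- ===== PRECONDITION & SPEC =====
-- Pre_ excludes lists containing an element outside 0..255: on those bytearray()/bytes()
-- raises ValueError in both programs whenever the scan reaches such an element, and when the
-- scan stops before reaching it both programs return the same decoded prefix anyway.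
def Pre_decode_utf8_bytes (byte_list : List Int) : Prop :=
  ∀ x ∈ byte_list, 0 ≤ x ∧ x ≤ 255
instance (byte_list : List Int) : Decidable (Pre_decode_utf8_bytes byte_list) := by
  unfold Pre_decode_utf8_bytes; infer_instance

def pvWitness_decode_utf8_bytes : List Int := [72, 101, 194, 169, 254]

def Spec_decode_utf8_bytes (byte_list : List Int) (out : List (Int × String × Int)) : Prop := out = decode_utf8_bytes_alt byte_list
instance (byte_list : List Int) (out : List (Int × String × Int)) : Decidable (Spec_decode_utf8_bytes byte_list out) := by unfold Spec_decode_utf8_bytes; infer_instance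

-- ===== CLAIM (what is proved, stated in full; the proofs are below) =====
def Claim_equal_decode_utf8_bytes : Prop := ∀ (byte_list : List Int), Dom_decode_utf8_bytes byte_list → Pre_decode_utf8_bytes byte_list → Spec_decode_utf8_bytes byte_list (decode_utf8_bytes byte_list)

-- ===== LEMMAS AND PROOFS =====

theorem dec_bad (b : Int) (r : List Int) (h1 : ¬(0 ≤ b ∧ b < 128)) (h2 : ¬(194 ≤ b ∧ b ≤ 223))
    (h3 : ¬(224 ≤ b ∧ b ≤ 239)) (h4 : ¬(240 ≤ b ∧ b ≤ 244)) : pvDec (b :: r) = none := by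
  rw [pvDec.eq_def]; dsimp only; rw [if_neg h1, if_neg h2, if_neg h3, if_neg h4]

theorem dec_ascii (b : Int) (r : List Int) (h : 0 ≤ b ∧ b < 128) :
    pvDec (b :: r) = (pvDec r).map (fun cs => Char.ofNat b.toNat :: cs) := by
  rw [pvDec.eq_def]; dsimp only; rw [if_pos h]

theorem dec2_nil (b : Int) (h : 194 ≤ b ∧ b ≤ 223) : pvDec [b] = none := by
  rw [pvDec.eq_def]; dsimp only; rw [if_neg (by omega), if_pos h]

theorem dec2_cons (b b1 : Int) (r : List Int) (h : 194 ≤ b ∧ b ≤ 223) :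
    pvDec (b :: b1 :: r) =
      if pvIsCont b1 then
        (pvDec r).map (fun cs => Char.ofNat ((b - 192) * 64 + (b1 - 128)).toNat :: cs)
      else none := by
  rw [pvDec.eq_def]; dsimp only; rw [if_neg (by omega), if_pos h]

theorem dec3_short (b : Int) (r : List Int) (h : 224 ≤ b ∧ b ≤ 239) (hr : r.length ≤ 1) :
    pvDec (b :: r) = none := by
  rw [pvDec.eq_def]; dsimp only; rw [if_neg (by omega), if_neg (by omega), if_pos h]
  match r with
  | [] => rfl
  | [b1] => rfl
  | b1 :: b2 :: r3 => simp at hr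

theorem dec3_cons (b b1 b2 : Int) (r : List Int) (h : 224 ≤ b ∧ b ≤ 239) :
    pvDec (b :: b1 :: b2 :: r) =
      if pvCont3 b b1 && pvIsCont b2 then
        (pvDec r).map (fun cs =>
          Char.ofNat ((b - 224) * 4096 + (b1 - 128) * 64 + (b2 - 128)).toNat :: cs)
      else none := by
  rw [pvDec.eq_def]; dsimp only; rw [if_neg (by omega), if_neg (by omega), if_pos h]

theorem dec4_short (b : Int) (r : List Int) (h : 240 ≤ b ∧ b ≤ 244) (hr : r.length ≤ 2) :
    pvDec (b :: r) = none := by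
  rw [pvDec.eq_def]; dsimp only; rw [if_neg (by omega), if_neg (by omega), if_neg (by omega), if_pos h]
  match r with
  | [] => rfl
  | [b1] => rfl
  | [b1, b2] => rfl
  | b1 :: b2 :: b3 :: r4 => simp at hr

theorem dec4_cons (b b1 b2 b3 : Int) (r : List Int) (h : 240 ≤ b ∧ b ≤ 244) :
    pvDec (b :: b1 :: b2 :: b3 :: r) =
      if pvCont4 b b1 && pvIsCont b2 && pvIsCont b3 then
        (pvDec r).map (fun cs =>
          Char.ofNat ((b - 240) * 262144 + (b1 - 128) * 4096 + (b2 - 128) * 64 + (b3 - 128)).toNat :: cs)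
      else none := by
  rw [pvDec.eq_def]; dsimp only; rw [if_neg (by omega), if_neg (by omega), if_neg (by omega), if_pos h]

theorem tryA_none : ∀ (sizes : List Nat) (l : List Int),
    (∀ k ∈ sizes, k ≤ l.length → pvDecode? (l.take k) = none) → pvTryA l sizes = none := by
  intro sizes
  induction sizes with
  | nil => intro l _; rfl
  | cons k rest ih =>
    intro l h
    simp only [pvTryA]
    by_cases hl : l.length < k
    · rw [if_pos hl]
    · rw [if_neg hl, h k (List.mem_cons_self) (Nat.le_of_not_lt hl)]
      exact ih l (fun k' hk' => h k' (List.mem_cons_of_mem _ hk'))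

theorem tryA_none_of_head (b : Int) (t : List Int) (h : ∀ r, pvDec (b :: r) = none) :
    pvTryA (b :: t) [1, 2, 3, 4] = none := by
  apply tryA_none
  intro k hk _
  have hex : ∃ r, (b :: t).take k = b :: r := by
    rcases (by simpa using hk : k = 1 ∨ k = 2 ∨ k = 3 ∨ k = 4) with rfl | rfl | rfl | rfl
    exacts [⟨_, rfl⟩, ⟨_, rfl⟩, ⟨_, rfl⟩, ⟨_, rfl⟩]
  rcases hex with ⟨r, hr⟩
  rw [hr]; unfold pvDecode?; rw [h r]; rfl

theorem step_eq (b : Int) (t : List Int) :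
    pvTryA (b :: t) [1, 2, 3, 4] =
      match pvLeadLen b with
      | none => none
      | some k =>
        if (b :: t).length < k then none
        else (pvDecode? ((b :: t).take k)).map (fun ch => (ch, k)) := by
  by_cases hA : 0 ≤ b ∧ b < 128
  · -- ASCII
    have hL : pvLeadLen b = some 1 := by unfold pvLeadLen; rw [if_pos hA.2]
    have hd : pvDecode? ((b :: t).take 1) = some (String.mk [Char.ofNat b.toNat]) := by
      show pvDecode? [b] = _
      unfold pvDecode?; rw [dec_ascii b [] hA]; rfl
    rw [hL]; dsimp only
    simp only [pvTryA, hd]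
    simp
  · by_cases hneg : b < 0
    · -- negative: B's lead test b < 128 fires but the decode of [b] fails; A fails all sizes
      have hL : pvLeadLen b = some 1 := by unfold pvLeadLen; rw [if_pos (by omega)]
      have hnone : ∀ r, pvDec (b :: r) = none := fun r =>
        dec_bad b r (by omega) (by omega) (by omega) (by omega)
      rw [hL]; dsimp only
      rw [tryA_none_of_head b t hnone]
      have hd : pvDecode? ((b :: t).take 1) = none := by
        show pvDecode? [b] = _
        unfold pvDecode?; rw [hnone []]; rfl
      rw [hd]; simp
    · by_cases hB : b ≤ 191
      · -- continuation byte as lead: invalid for both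
        have hL : pvLeadLen b = none := by
          unfold pvLeadLen
          rw [if_neg (by omega), if_neg (by omega), if_neg (by omega), if_neg (by omega)]
        have hnone : ∀ r, pvDec (b :: r) = none := fun r =>
          dec_bad b r (by omega) (by omega) (by omega) (by omega)
        rw [hL]; dsimp only
        exact tryA_none_of_head b t hnone
      · by_cases hC : b ≤ 193
        · -- 0xC0/0xC1: B computes length 2 but the decode fails; A fails all sizes
          have hL : pvLeadLen b = some 2 := by
            unfold pvLeadLen; rw [if_neg (by omega), if_pos (by omega)]
          have hnone : ∀ r, pvDec (b :: r) = none := fun r =>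
            dec_bad b r (by omega) (by omega) (by omega) (by omega)
          rw [hL]; dsimp only
          rw [tryA_none_of_head b t hnone]
          have hd : pvDecode? ((b :: t).take 2) = none := by
            show pvDecode? (b :: t.take 1) = _
            unfold pvDecode?; rw [hnone _]; rfl
          rw [hd]; simp
        · by_cases hD : b ≤ 223
          · -- two-byte lead 0xC2..0xDF
            have h2 : 194 ≤ b ∧ b ≤ 223 := by omega
            have hL : pvLeadLen b = some 2 := by
              unfold pvLeadLen; rw [if_neg (by omega), if_pos (by omega)]
            have hd1 : pvDecode? ((b :: t).take 1) = none := by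
              show pvDecode? [b] = _
              unfold pvDecode?; rw [dec2_nil b h2]; rfl
            rw [hL]; dsimp only
            cases t with
            | nil =>
              simp only [pvTryA, hd1]
              simp
            | cons b1 t2 =>
              have tk2 : (b :: b1 :: t2).take 2 = [b, b1] := rfl
              by_cases hc : pvIsCont b1
              · have hd2 : pvDecode? ((b :: b1 :: t2).take 2) =
                    some (String.mk [Char.ofNat ((b - 192) * 64 + (b1 - 128)).toNat]) := by
                  rw [tk2]; unfold pvDecode?; rw [dec2_cons b b1 [] h2, if_pos hc]; rfl
                simp only [pvTryA, hd1, hd2]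
                simp
              · have hnone2 : ∀ r, pvDec (b :: b1 :: r) = none := fun r => by
                  rw [dec2_cons b b1 r h2, if_neg hc]
                have hall : pvTryA (b :: b1 :: t2) [1, 2, 3, 4] = none := by
                  apply tryA_none
                  intro k hk _
                  rcases (by simpa using hk : k = 1 ∨ k = 2 ∨ k = 3 ∨ k = 4) with rfl | rfl | rfl | rfl
                  · exact hd1
                  · show pvDecode? (b :: b1 :: t2.take 0) = none
                    unfold pvDecode?; rw [hnone2 _]; rfl
                  · show pvDecode? (b :: b1 :: t2.take 1) = none
                    unfold pvDecode?; rw [hnone2 _]; rfl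
                  · show pvDecode? (b :: b1 :: t2.take 2) = none
                    unfold pvDecode?; rw [hnone2 _]; rfl
                rw [hall]
                have hd2' : pvDecode? ((b :: b1 :: t2).take 2) = none := by
                  rw [tk2]; unfold pvDecode?; rw [hnone2 []]; rfl
                rw [hd2']; simp
          · by_cases hE : b ≤ 239
            · -- three-byte lead 0xE0..0xEF
              have h3 : 224 ≤ b ∧ b ≤ 239 := by omega
              have hL : pvLeadLen b = some 3 := by
                unfold pvLeadLen
                rw [if_neg (by omega), if_neg (by omega), if_pos (by omega)]
              rw [hL]; dsimp only
              have hshort : ∀ r : List Int, r.length ≤ 1 → pvDecode? (b :: r) = none := by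
                intro r hr; unfold pvDecode?; rw [dec3_short b r h3 hr]; rfl
              rcases t with _ | ⟨b1, _ | ⟨b2, t3⟩⟩
              · simp only [pvTryA]
                rw [show pvDecode? ((b :: ([] : List Int)).take 1) = none from hshort [] (by simp)]
                simp
              · simp only [pvTryA]
                rw [show pvDecode? ((b :: [b1]).take 1) = none from hshort [] (by simp),
                    show pvDecode? ((b :: [b1]).take 2) = none from hshort [b1] (by simp)]
                simp
              · by_cases hc : pvCont3 b b1 && pvIsCont b2
                · have hd3 : pvDecode? ((b :: b1 :: b2 :: t3).take 3) =
                      some (String.mk [Char.ofNat ((b - 224) * 4096 + (b1 - 128) * 64 + (b2 - 128)).toNat]) := by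
                    show pvDecode? [b, b1, b2] = _
                    unfold pvDecode?; rw [dec3_cons b b1 b2 [] h3, if_pos hc]; rfl
                  simp only [pvTryA, hd3,
                    show pvDecode? ((b :: b1 :: b2 :: t3).take 1) = none from hshort [] (by simp),
                    show pvDecode? ((b :: b1 :: b2 :: t3).take 2) = none from hshort [b1] (by simp)]
                  simp
                · have hnone3 : ∀ r, pvDec (b :: b1 :: b2 :: r) = none := fun r => by
                    rw [dec3_cons b b1 b2 r h3, if_neg hc]
                  have hall : pvTryA (b :: b1 :: b2 :: t3) [1, 2, 3, 4] = none := by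
                    apply tryA_none
                    intro k hk _
                    rcases (by simpa using hk : k = 1 ∨ k = 2 ∨ k = 3 ∨ k = 4) with rfl | rfl | rfl | rfl
                    · exact hshort [] (by simp)
                    · exact hshort [b1] (by simp)
                    · show pvDecode? (b :: b1 :: b2 :: t3.take 0) = none
                      unfold pvDecode?; rw [hnone3 _]; rfl
                    · show pvDecode? (b :: b1 :: b2 :: t3.take 1) = none
                      unfold pvDecode?; rw [hnone3 _]; rfl
                  rw [hall]
                  have hd3' : pvDecode? ((b :: b1 :: b2 :: t3).take 3) = none := by
                    show pvDecode? [b, b1, b2] = _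
                    unfold pvDecode?; rw [hnone3 []]; rfl
                  rw [hd3']; simp
            · by_cases hF : b ≤ 244
              · -- four-byte lead 0xF0..0xF4
                have h4 : 240 ≤ b ∧ b ≤ 244 := by omega
                have hL : pvLeadLen b = some 4 := by
                  unfold pvLeadLen
                  rw [if_neg (by omega), if_neg (by omega), if_neg (by omega), if_pos (by omega)]
                rw [hL]; dsimp only
                have hshort : ∀ r : List Int, r.length ≤ 2 → pvDecode? (b :: r) = none := by
                  intro r hr; unfold pvDecode?; rw [dec4_short b r h4 hr]; rfl
                rcases t with _ | ⟨b1, _ | ⟨b2, _ | ⟨b3, t4⟩⟩⟩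
                · simp only [pvTryA]
                  rw [show pvDecode? ((b :: ([] : List Int)).take 1) = none from hshort [] (by simp)]
                  simp
                · simp only [pvTryA]
                  rw [show pvDecode? ((b :: [b1]).take 1) = none from hshort [] (by simp),
                      show pvDecode? ((b :: [b1]).take 2) = none from hshort [b1] (by simp)]
                  simp
                · simp only [pvTryA]
                  rw [show pvDecode? ((b :: [b1, b2]).take 1) = none from hshort [] (by simp),
                      show pvDecode? ((b :: [b1, b2]).take 2) = none from hshort [b1] (by simp),
                      show pvDecode? ((b :: [b1, b2]).take 3) = none from hshort [b1, b2] (by simp)]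
                  simp
                · by_cases hc : pvCont4 b b1 && pvIsCont b2 && pvIsCont b3
                  · have hd4 : pvDecode? ((b :: b1 :: b2 :: b3 :: t4).take 4) =
                        some (String.mk [Char.ofNat ((b - 240) * 262144 + (b1 - 128) * 4096 + (b2 - 128) * 64 + (b3 - 128)).toNat]) := by
                      show pvDecode? [b, b1, b2, b3] = _
                      unfold pvDecode?; rw [dec4_cons b b1 b2 b3 [] h4, if_pos hc]; rfl
                    simp only [pvTryA, hd4,
                      show pvDecode? ((b :: b1 :: b2 :: b3 :: t4).take 1) = none from hshort [] (by simp),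
                      show pvDecode? ((b :: b1 :: b2 :: b3 :: t4).take 2) = none from hshort [b1] (by simp),
                      show pvDecode? ((b :: b1 :: b2 :: b3 :: t4).take 3) = none from hshort [b1, b2] (by simp)]
                    split_ifs <;> first | rfl | omega
                  · have hnone4 : ∀ r, pvDec (b :: b1 :: b2 :: b3 :: r) = none := fun r => by
                      rw [dec4_cons b b1 b2 b3 r h4, if_neg hc]
                    have hall : pvTryA (b :: b1 :: b2 :: b3 :: t4) [1, 2, 3, 4] = none := by
                      apply tryA_none
                      intro k hk _
                      rcases (by simpa using hk : k = 1 ∨ k = 2 ∨ k = 3 ∨ k = 4) with rfl | rfl | rfl | rfl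
                      · exact hshort [] (by simp)
                      · exact hshort [b1] (by simp)
                      · exact hshort [b1, b2] (by simp)
                      · show pvDecode? (b :: b1 :: b2 :: b3 :: t4.take 0) = none
                        unfold pvDecode?; rw [hnone4 _]; rfl
                    rw [hall]
                    have hd4' : pvDecode? ((b :: b1 :: b2 :: b3 :: t4).take 4) = none := by
                      show pvDecode? [b, b1, b2, b3] = _
                      unfold pvDecode?; rw [hnone4 []]; rfl
                    rw [hd4']; simp
              · by_cases hG : b ≤ 247
                · -- 0xF5..0xF7: B computes length 4 but the decode fails; A fails all sizes
                  have hL : pvLeadLen b = some 4 := by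
                    unfold pvLeadLen
                    rw [if_neg (by omega), if_neg (by omega), if_neg (by omega), if_pos (by omega)]
                  have hnone : ∀ r, pvDec (b :: r) = none := fun r =>
                    dec_bad b r (by omega) (by omega) (by omega) (by omega)
                  rw [hL]; dsimp only
                  rw [tryA_none_of_head b t hnone]
                  have hd : pvDecode? ((b :: t).take 4) = none := by
                    show pvDecode? (b :: t.take 3) = _
                    unfold pvDecode?; rw [hnone _]; rfl
                  rw [hd]; simp
                · -- 0xF8..: invalid lead for both (254/255 never reach here in the loops)
                  have hL : pvLeadLen b = none := by
                    unfold pvLeadLen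
                    rw [if_neg (by omega), if_neg (by omega), if_neg (by omega), if_neg (by omega)]
                  have hnone : ∀ r, pvDec (b :: r) = none := fun r =>
                    dec_bad b r (by omega) (by omega) (by omega) (by omega)
                  rw [hL]; dsimp only
                  exact tryA_none_of_head b t hnone

theorem loops_eq : ∀ (l : List Int) (c : Int), pvLoopA c l = pvLoopB c l := by
  have key : ∀ (n : Nat) (l : List Int), l.length ≤ n → ∀ c, pvLoopA c l = pvLoopB c l := by
    intro n
    induction n with
    | zero =>
      intro l hl c
      have hnil : l = [] := List.eq_nil_of_length_eq_zero (Nat.le_zero.mp hl)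
      subst hnil
      rw [pvLoopA.eq_def, pvLoopB.eq_def]
    | succ n ih =>
      intro l hl c
      cases l with
      | nil => rw [pvLoopA.eq_def, pvLoopB.eq_def]
      | cons b t =>
        rw [pvLoopA.eq_def, pvLoopB.eq_def]
        dsimp only
        by_cases h254 : b = 254
        · rw [if_pos h254, if_pos h254]
          dsimp only
          exact congrArg _ (ih t (by simp at hl; omega) (c + 1))
        · by_cases h255 : b = 255
          · rw [if_neg h254, if_pos h255, if_neg h254, if_pos h255]
            dsimp only
            exact congrArg _ (ih t (by simp at hl; omega) (c + 1))
          · rw [if_neg h254, if_neg h255, if_neg h254, if_neg h255]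
            rw [step_eq b t]
            cases hL : pvLeadLen b with
            | none => rfl
            | some k =>
              dsimp only
              by_cases hlen : (b :: t).length < k
              · rw [if_pos hlen, if_pos hlen]
              · rw [if_neg hlen, if_neg hlen]
                cases hdc : pvDecode? ((b :: t).take k) with
                | none => rfl
                | some ch =>
                  dsimp only [Option.map_some]
                  refine congrArg _ (ih ((b :: t).drop k) ?_ (c + 1))
                  have hk1 : 1 ≤ k := pvLeadLen_pos b k hL
                  simp at hl ⊢
                  omega
  exact fun l c => key l.length l le_rfl c

-- ===== VERDICT (by name: the statement is the Claim_ definition above) =====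
theorem decode_utf8_bytes_spec : Claim_equal_decode_utf8_bytes := by
  intro byte_list _ _
  unfold Spec_decode_utf8_bytes decode_utf8_bytes decode_utf8_bytes_alt
  exact loops_eq byte_list 0
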